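-- pv_equiv track=rewrite | github.com/bandrow/scibot | release.py | getPMID
-- ===== SOURCE A (Python) =====
-- def getPMID(tags):
--     # because sometime there is garbage in the annotations
--     ids = set()
--     for t in tags:
--         if t.startswith('PMID:') and t[5:].isnumeric():
--             ids.add(t)
--     if ids:
--         if len(ids) > 1:
--             raise ValueError('More than one PMID detected!')
--         return list(ids)[0]
-- ===== SOURCE B (Python) =====
-- def getPMID(tags):
--     # find-first then verify: locate the first valid PMID tag, then check
--     # in a second pass that no other distinct valid PMID tag occurs
--     def valid(t):
--         return t.startswith('PMID:') and t[5:].isnumeric()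
--     first = next((t for t in tags if valid(t)), None)
--     if first is not None and any(valid(t) and t != first for t in tags):
--         raise ValueError('More than one PMID detected!')
--     return first
-- ===== Notes on version B (the rewrite author's own statement) =====
-- stated objective: simpler
-- what changed: Replaced set-accumulation plus post-hoc length check by a staged find-first (next over a generator) followed by a separate verification pass (any) that raises if a distinct valid PMID occurs.
-- outside the precondition, e.g. on getPMID(['PMID:1', 'PMID:2']): A raises ValueError, B raises ValueError
import Mathlib
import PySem

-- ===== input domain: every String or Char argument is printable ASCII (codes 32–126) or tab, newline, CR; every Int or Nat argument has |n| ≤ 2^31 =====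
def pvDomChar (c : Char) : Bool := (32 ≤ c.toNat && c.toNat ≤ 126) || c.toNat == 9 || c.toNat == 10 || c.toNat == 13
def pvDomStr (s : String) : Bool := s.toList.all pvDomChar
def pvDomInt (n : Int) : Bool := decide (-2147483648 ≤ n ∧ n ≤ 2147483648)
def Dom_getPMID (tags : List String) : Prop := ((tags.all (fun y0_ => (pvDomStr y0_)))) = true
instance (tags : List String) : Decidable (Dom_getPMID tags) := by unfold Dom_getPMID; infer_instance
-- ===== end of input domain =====

-- B replaces A's set-accumulation + length check by a staged find-first then verify
-- decomposition (simpler); equivalence is about the return value — where both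
-- Pythons raise ValueError (two distinct valid PMIDs) is excluded by Pre_.

-- shared predicate: t.startswith('PMID:') and t[5:].isnumeric()
-- (isnumeric == isdigit on the printable-ASCII domain Dom_getPMID; exact there)
def pvValid (t : String) : Bool :=
  PySem.Str.startswith t "PMID:" && PySem.Str.strIsdigit (PySem.Str.slice t (some 5) none)

-- ===== PORT A =====
def getPMID (tags : List String) : Option String :=
  let ids : PySem.Set String :=
    tags.foldl (fun s t => if pvValid t then PySem.Set.add s t else s) PySem.Set.empty
  if PySem.Set.len ids > 0 then
    if PySem.Set.len ids > 1 then none  -- raise ValueError('More than one PMID detected!')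
    else ids[0]?                         -- list(ids)[0]; len == 1, so hash order is irrelevant
  else none                              -- implicit return None

-- ===== PORT B =====
def getPMID_alt (tags : List String) : Option String :=
  match tags.find? (fun t => pvValid t) with   -- next((t for t in tags if valid(t)), None)
  | none => none
  | some first =>
    if tags.any (fun t => pvValid t && t ≠ first) then
      none                               -- raise ValueError('More than one PMID detected!')
    else some first

-- ===== PRECONDITION & SPEC =====
-- Pre_ excludes exactly the inputs with two distinct valid PMID tags, on which both
-- A and B raise ValueError('More than one PMID detected!').
def Pre_getPMID (tags : List String) : Prop :=
  ∀ s ∈ tags, ∀ t ∈ tags, pvValid s = true → pvValid t = true → s = t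
instance (tags : List String) : Decidable (Pre_getPMID tags) := by
  unfold Pre_getPMID; infer_instance

def pvWitness_getPMID : List String := ["PMID:7", "junk"]

def Spec_getPMID (tags : List String) (out : Option String) : Prop := out = getPMID_alt tags
instance (tags : List String) (out : Option String) : Decidable (Spec_getPMID tags out) := by
  unfold Spec_getPMID; infer_instance

-- ===== CLAIM (what is proved, stated in full; the proofs are below) =====
def Claim_equal_getPMID : Prop :=
  ∀ (tags : List String), Dom_getPMID tags → Pre_getPMID tags → Spec_getPMID tags (getPMID tags)

-- ===== LEMMAS AND PROOFS =====

-- if every valid tag in the list equals x, A's running set stays [x]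
lemma pv_setkey (tags : List String) (x : String)
    (h : ∀ t ∈ tags, pvValid t = true → t = x) :
    tags.foldl (fun s t => if pvValid t then PySem.Set.add s t else s) [x] = [x] := by
  induction tags with
  | nil => rfl
  | cons t rest ih =>
    have hrest : ∀ u ∈ rest, pvValid u = true → u = x := fun u hu => h u (by simp [hu])
    by_cases hv : pvValid t = true
    · have ht : t = x := h t (by simp) hv
      subst ht
      have h1 : PySem.Set.add [t] t = [t] := by simp [PySem.Set.add, PySem.Set.contains]
      simp [hv, List.foldl, ih hrest]
    · simp [hv, List.foldl, ih hrest]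

lemma pv_main (tags : List String) (hp : Pre_getPMID tags) :
    getPMID tags = getPMID_alt tags := by
  induction tags with
  | nil => rfl
  | cons t rest ih =>
    have hprest : Pre_getPMID rest := by
      intro s hs u hu hvs hvu
      exact hp s (by simp [hs]) u (by simp [hu]) hvs hvu
    by_cases hv : pvValid t = true
    · have hall : ∀ u ∈ rest, pvValid u = true → u = t := by
        intro u hu hvu
        exact hp u (by simp [hu]) t (by simp) hvu hv
      have hk := pv_setkey rest t hall
      simp [getPMID, getPMID_alt, List.find?, List.any, hv, List.foldl, hk,
        PySem.Set.len]
      exact hall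
    · have := ih hprest
      simpa [getPMID, getPMID_alt, List.find?, List.any, hv, List.foldl] using this

-- ===== VERDICT (by name: the statement is the Claim_ definition above) =====
theorem getPMID_spec : Claim_equal_getPMID := by
  intro tags _ hp
  unfold Spec_getPMID
  exact pv_main tags hp
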